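-- pv_equiv track=rewrite | github.com/SrihariBits/AutoKalpana | lexer.py | compressCommas
-- ===== SOURCE A (Python) =====
-- def compressCommas(inputString, raga):
--     inputList = list(inputString)
--     for i in range(len(inputList)):
--         if(i == 0 and inputList[i] == ','):
--             inputList[i] = 'S'
--         elif(inputList[i] == ','):
--             inputList[i] = inputList[i-1]
--     outputString = ""
--     return outputString.join(inputList)
-- ===== SOURCE B (Python) =====
-- def compressCommas(inputString, raga):
--     # run-length pass over the REVERSED string: a run of k commas read right-to-left
--     # sits after some char c in the original, so it expands to k extra copies of c;
--     # commas left pending at the end (= leading commas of the original) become 'S'.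
--     parts = []
--     pending = 0
--     for ch in reversed(inputString):
--         if ch == ',':
--             pending += 1
--         else:
--             parts.append(ch * (pending + 1))
--             pending = 0
--     parts.append('S' * pending)
--     return ''.join(reversed(parts))
-- ===== Notes on version B (the rewrite author's own statement) =====
-- stated objective: alternative
-- what changed: B replaces A's left-to-right in-place mutation (copying the previous mutated cell into each comma) by a right-to-left run-length pass: it counts each comma run while scanning the reversed string, emits every non-comma char replicated run+1 times, and turns commas pending at the start into 'S's.
import Mathlib
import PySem

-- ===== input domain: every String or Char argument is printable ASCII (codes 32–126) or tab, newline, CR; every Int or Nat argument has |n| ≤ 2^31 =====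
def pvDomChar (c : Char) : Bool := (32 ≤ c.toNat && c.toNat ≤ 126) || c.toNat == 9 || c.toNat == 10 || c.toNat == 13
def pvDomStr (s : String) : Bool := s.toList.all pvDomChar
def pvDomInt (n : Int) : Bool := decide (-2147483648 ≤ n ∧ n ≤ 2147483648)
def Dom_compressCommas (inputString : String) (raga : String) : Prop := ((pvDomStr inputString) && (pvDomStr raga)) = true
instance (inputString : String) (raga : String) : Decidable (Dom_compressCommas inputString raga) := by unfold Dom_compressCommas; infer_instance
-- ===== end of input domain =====

-- B replaces A's left-to-right in-place mutation by a right-to-left run-length pass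
-- (count each comma run on the reversed string, replicate the following char, pending
-- leading commas become 'S'); same output, same cost.

-- ===== PORT A =====
-- literal port of A: mutate inputList[i] in place for each i in range(len), reading inputList[i-1] back from the mutated list
def compressCommas (inputString : String) (raga : String) : String :=
  let inputList := inputString.toList
  let inputList :=
    (PySem.List.pyRange 0 (inputList.length : Int) 1).foldl
      (fun lst i =>
        if i == 0 && PySem.List.pyGetD lst i ' ' == ',' then
          PySem.List.pySetD lst i 'S'
        else if PySem.List.pyGetD lst i ' ' == ',' then
          PySem.List.pySetD lst i (PySem.List.pyGetD lst (i - 1) ' ')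
        else lst)
      inputList
  String.mk inputList

-- ===== PORT B =====
-- literal port of B: fold over reversed(inputString) carrying (pending comma count, parts);
-- ch*(pending+1) is List.replicate, ''.join(reversed(parts)) is parts.reverse.flatten
def compressCommas_alt (inputString : String) (raga : String) : String :=
  let st := inputString.toList.reverse.foldl
    (fun (st : Nat × List (List Char)) ch =>
      if ch = ',' then (st.1 + 1, st.2)
      else (0, st.2 ++ [List.replicate (st.1 + 1) ch]))
    (0, [])
  let parts := st.2 ++ [List.replicate st.1 'S']
  String.mk parts.reverse.flatten

-- ===== PRECONDITION & SPEC =====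
def Spec_compressCommas (inputString : String) (raga : String) (out : String) : Prop := out = compressCommas_alt inputString raga
instance (inputString : String) (raga : String) (out : String) : Decidable (Spec_compressCommas inputString raga out) := by unfold Spec_compressCommas; infer_instance

-- ===== CLAIM (what is proved, stated in full; the proofs are below) =====
def Claim_equal_compressCommas : Prop := ∀ (inputString : String) (raga : String), Dom_compressCommas inputString raga → Spec_compressCommas inputString raga (compressCommas inputString raga)

-- ===== LEMMAS AND PROOFS =====

-- mathematical description both programs compute: forward fill with carried char
def pvFFill (prev : Char) : List Char → List Char
  | [] => []
  | c :: cs => if c = ',' then prev :: pvFFill prev cs else c :: pvFFill c cs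

-- B's fold step, as a foldr over the original list (foldl over the reverse)
def pvStep (st : Nat × List (List Char)) (ch : Char) : Nat × List (List Char) :=
  if ch = ',' then (st.1 + 1, st.2)
  else (0, st.2 ++ [List.replicate (st.1 + 1) ch])

def pvState (l : List Char) : Nat × List (List Char) :=
  l.foldr (fun ch st => pvStep st ch) (0, [])

-- B-side invariant: the pending-comma count and collected runs reproduce the forward fill
lemma pvB_inv (l : List Char) : ∀ (prev : Char),
    pvFFill prev l =
      List.replicate (pvState l).1 prev ++ (pvState l).2.reverse.flatten := by
  induction l with
  | nil => intro prev; simp [pvFFill, pvState]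
  | cons c cs ih =>
    intro prev
    have hst : pvState (c :: cs) = pvStep (pvState cs) c := rfl
    by_cases hc : c = ','
    · rw [hst]
      simp only [pvStep, if_pos hc, pvFFill, hc, if_pos rfl]
      rw [ih prev]
      simp [List.replicate_succ]
    · rw [hst]
      simp only [pvStep, if_neg hc, pvFFill, if_neg hc]
      rw [ih c]
      simp [List.replicate_succ]

lemma pvSet_append_length (pre : List Char) (c : Char) (cs : List Char) (v : Char) :
    (pre ++ c :: cs).set pre.length v = pre ++ v :: cs := by
  induction pre with
  | nil => simp
  | cons d ds ih => simp [ih]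

lemma pvGetD_append_length (pre : List Char) (c : Char) (cs : List Char) :
    PySem.List.pyGetD (pre ++ c :: cs) (pre.length : Int) ' ' = c := by
  rw [PySem.List.pyGetD_natCast]
  induction pre with
  | nil => simp
  | cons d ds ih => simpa using ih

lemma pvGetD_append_pred (pre : List Char) (rest : List Char) (h : pre ≠ []) :
    PySem.List.pyGetD (pre ++ rest) ((pre.length : Int) - 1) ' ' = pre.getLastD 'S' := by
  have h1 : (1 : Int) ≤ (pre.length : Int) := by
    have := List.length_pos_iff.mpr h; omega
  have h2 : ((pre.length : Int) - 1) = ((pre.length - 1 : Nat) : Int) := by omega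
  rw [h2, PySem.List.pyGetD_natCast]
  rcases List.eq_nil_or_concat pre with rfl | ⟨ys, y, rfl⟩
  · simp at h
  · simp [List.getD_eq_getElem?_getD, List.getElem?_append_left,
      List.getElem?_concat_length, List.getLastD_concat]

-- A's loop invariant: having processed the prefix `done`, the remaining passes forward-fill `rest`
lemma pvA_loop (rest : List Char) : ∀ (done : List Char),
    (PySem.List.pyRange (done.length : Int) ((done.length : Int) + (rest.length : Int)) 1).foldl
      (fun lst i =>
        if i == 0 && PySem.List.pyGetD lst i ' ' == ',' then
          PySem.List.pySetD lst i 'S'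
        else if PySem.List.pyGetD lst i ' ' == ',' then
          PySem.List.pySetD lst i (PySem.List.pyGetD lst (i - 1) ' ')
        else lst)
      (done ++ rest)
    = done ++ pvFFill (done.getLastD 'S') rest := by
  induction rest with
  | nil => intro done; simp [PySem.List.pyRange_one_eq_nil, pvFFill]
  | cons c cs ih =>
    intro done
    have hlt : (done.length : Int) < (done.length : Int) + ((c :: cs).length : Int) := by
      simp only [List.length_cons]; push_cast; omega
    rw [PySem.List.pyRange_one_cons hlt]
    simp only [List.foldl_cons]
    rw [pvGetD_append_length]
    by_cases hc : c = ','
    · rcases done with _ | ⟨d, ds⟩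
      · -- i = 0, first branch fires: set to 'S'
        simp only [hc, List.nil_append, List.length_nil, Nat.cast_zero]
        rw [if_pos (by decide)]
        have hset : PySem.List.pySetD (',' :: cs) 0 'S' = 'S' :: cs := by
          simp [PySem.List.pySetD_of_nonneg]
        rw [hset]
        have hIH := ih ['S']
        simp only [List.length_singleton, Nat.cast_one, List.singleton_append] at hIH
        rw [show (['S'] : List Char).getLastD 'S' = 'S' from rfl] at hIH
        simp only [zero_add]
        rw [show ((((',' :: cs).length : Nat) : Int)) = 1 + (cs.length : Int) from by simp only [List.length_cons]; push_cast; omega]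
        rw [hIH]
        simp [pvFFill]
      · -- i > 0, second branch: copy previous (already-filled) cell
        set pre := d :: ds with hpre
        have hne : pre ≠ [] := by simp [hpre]
        have hlen0 : ((pre.length : Int) == 0) = false := by
          rw [hpre]
          simp only [List.length_cons, beq_eq_false_iff_ne, ne_eq]
          push_cast; omega
        rw [show ((((pre.length : Nat) : Int) == 0 && (c == ','))) = false by
          simp [hlen0]]
        simp only [Bool.false_eq_true, if_false]
        rw [if_pos (by simp [hc]), PySem.List.pySetD_natCast,
          pvGetD_append_pred pre (c :: cs) hne, pvSet_append_length]
        set prev := pre.getLastD 'S' with hprev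
        have hIH := ih (pre ++ [prev])
        have hlen : ((pre ++ [prev]).length : Int) = (pre.length : Int) + 1 := by simp
        rw [hlen, List.append_assoc] at hIH
        simp only [List.singleton_append] at hIH
        have hrange : (pre.length : Int) + ((c :: cs).length : Int) = (pre.length : Int) + 1 + (cs.length : Int) := by
          simp only [List.length_cons]; push_cast; omega
        rw [hrange, hIH, List.getLastD_concat]
        simp [pvFFill, hc, List.append_assoc]
    · -- non-comma: list unchanged, prev becomes c
      have hb : ((((done.length : Nat) : Int)) == 0 && (c == ',')) = false := by
        have : (c == ',') = false := by simpa using hc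
        simp [this]
      rw [hb]
      simp only [Bool.false_eq_true, if_false]
      rw [if_neg (by simp [hc])]
      have hIH := ih (done ++ [c])
      have hlen : ((done ++ [c]).length : Int) = (done.length : Int) + 1 := by simp
      rw [hlen, List.append_assoc] at hIH
      simp only [List.singleton_append] at hIH
      have hrange : (done.length : Int) + ((c :: cs).length : Int) = (done.length : Int) + 1 + (cs.length : Int) := by
        simp only [List.length_cons]; push_cast; omega
      rw [hrange, hIH, List.getLastD_concat]
      simp [pvFFill, hc, List.append_assoc]

-- B's foldl over the reversed list is the foldr pvState
lemma pvB_eq_ffill (s : String) (raga : String) :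
    compressCommas_alt s raga = String.mk (pvFFill 'S' s.toList) := by
  unfold compressCommas_alt
  have hfold : s.toList.reverse.foldl
      (fun (st : Nat × List (List Char)) ch =>
        if ch = ',' then (st.1 + 1, st.2)
        else (0, st.2 ++ [List.replicate (st.1 + 1) ch]))
      (0, []) = pvState s.toList := by
    rw [List.foldl_reverse]; rfl
  rw [hfold, pvB_inv s.toList 'S']
  simp

-- ===== VERDICT (by name: the statement is the Claim_ definition above) =====
theorem compressCommas_spec : Claim_equal_compressCommas := by
  intro s raga _
  show compressCommas s raga = compressCommas_alt s raga
  have hA := pvA_loop s.toList []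
  simp only [List.length_nil, Nat.cast_zero, List.nil_append, zero_add,
    List.getLastD_nil] at hA
  rw [pvB_eq_ffill]
  unfold compressCommas
  simp only [hA]
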